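-- pv_equiv track=rewrite | github.com/MaureenZOU/traffic_prediction | Graph/busyRatio.py | getRecordMatrix
-- ===== SOURCE A (Python) =====
-- def getRecordMatrix(dataMatrix, recordSet):
--     outMatrix = []
--     for i in range(1, len(dataMatrix)):
--         newLine = []
--         newLine.append(dataMatrix[i][0])
--         for j in range(1, len(dataMatrix[i])):
--             if j in recordSet:
--                 newLine.append(dataMatrix[i][j])
--         outMatrix.append(newLine)
--
--     return outMatrix
-- ===== SOURCE B (Python) =====
-- def getRecordMatrix(dataMatrix, recordSet):
--     rows = dataMatrix[1:]
--     out = [[row[0]] for row in rows]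
--     maxLen = max(map(len, rows), default=0)
--     for j in sorted(set(recordSet)):
--         if 1 <= j < maxLen:
--             for nl, row in zip(out, rows):
--                 if j < len(row):
--                     nl.append(row[j])
--     return out
-- ===== Notes on version B (the rewrite author's own statement) =====
-- stated objective: alternative
-- what changed: B builds the output column-by-column: it seeds each output row with its first element, computes the maximum row length, and iterates once over sorted(set(recordSet)) (restricted to 1 <= j < maxLen) extending every row with that column, instead of A's row-by-row scan that tests each column index for membership in recordSet.
import Mathlib
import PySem

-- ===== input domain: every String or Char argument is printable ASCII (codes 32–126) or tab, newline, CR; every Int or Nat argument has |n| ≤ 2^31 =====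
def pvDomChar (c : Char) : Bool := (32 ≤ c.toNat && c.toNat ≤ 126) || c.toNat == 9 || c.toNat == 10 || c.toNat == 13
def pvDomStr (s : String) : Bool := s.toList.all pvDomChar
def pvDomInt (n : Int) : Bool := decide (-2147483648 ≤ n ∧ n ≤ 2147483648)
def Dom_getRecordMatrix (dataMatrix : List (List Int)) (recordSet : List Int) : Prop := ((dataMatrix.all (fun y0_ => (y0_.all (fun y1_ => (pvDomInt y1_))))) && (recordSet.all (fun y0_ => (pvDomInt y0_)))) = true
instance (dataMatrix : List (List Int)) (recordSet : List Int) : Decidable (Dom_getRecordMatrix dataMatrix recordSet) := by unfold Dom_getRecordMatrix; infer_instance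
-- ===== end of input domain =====

-- B builds the output column-by-column over sorted(set(recordSet)) instead of A's per-row scan testing each column index for membership (alternative decomposition, same results).

-- ===== PORT A =====
def getRecordMatrix (dataMatrix : List (List Int)) (recordSet : List Int) : List (List Int) :=
  (PySem.List.pyRange 1 (dataMatrix.length : Int) 1).foldl
    (fun outMatrix i =>
      let row := PySem.List.pyGetD dataMatrix i []
      let newLine := [PySem.List.pyGetD row 0 0]
      let newLine := (PySem.List.pyRange 1 (row.length : Int) 1).foldl
        (fun nl j => if j ∈ recordSet then nl ++ [PySem.List.pyGetD row j 0] else nl) newLine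
      outMatrix ++ [newLine]) []

-- ===== PORT B =====
def getRecordMatrix_alt (dataMatrix : List (List Int)) (recordSet : List Int) : List (List Int) :=
  let rows := PySem.List.slice dataMatrix (some 1) none
  let out := rows.map (fun row => [PySem.List.pyGetD row 0 0])
  let maxLen := (rows.map (fun row => (row.length : Int))).foldl max 0
  (PySem.List.sorted (PySem.Set.ofList recordSet) (fun x => x) false).foldl
    (fun out j =>
      if 1 ≤ j ∧ j < maxLen then
        List.zipWith (fun nl row =>
          if j < (row.length : Int) then nl ++ [PySem.List.pyGetD row j 0] else nl) out rows
      else out) out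

-- ===== PRECONDITION & SPEC =====
-- Pre_ excludes exactly the inputs where Python A raises IndexError: a row after the first that is empty (row[0] fails).
def Pre_getRecordMatrix (dataMatrix : List (List Int)) (recordSet : List Int) : Prop :=
  ∀ r ∈ dataMatrix.tail, r ≠ []
instance (dataMatrix : List (List Int)) (recordSet : List Int) : Decidable (Pre_getRecordMatrix dataMatrix recordSet) := by unfold Pre_getRecordMatrix; infer_instance
def pvWitness_getRecordMatrix : List (List Int) × List Int := ([[0, 7, 8], [1, 2, 3], [4, 5, 6]], [2, 1, 2])

def Spec_getRecordMatrix (dataMatrix : List (List Int)) (recordSet : List Int) (out : List (List Int)) : Prop := out = getRecordMatrix_alt dataMatrix recordSet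
instance (dataMatrix : List (List Int)) (recordSet : List Int) (out : List (List Int)) : Decidable (Spec_getRecordMatrix dataMatrix recordSet out) := by unfold Spec_getRecordMatrix; infer_instance

-- ===== CLAIM (what is proved, stated in full; the proofs are below) =====
def Claim_equal_getRecordMatrix : Prop := ∀ (dataMatrix : List (List Int)) (recordSet : List Int), Dom_getRecordMatrix dataMatrix recordSet → Pre_getRecordMatrix dataMatrix recordSet → Spec_getRecordMatrix dataMatrix recordSet (getRecordMatrix dataMatrix recordSet)

-- ===== LEMMAS AND PROOFS =====

-- folding "append one element" is map
theorem foldl_append_singleton {α β : Type} (f : α → β) :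
    ∀ (l : List α) (init : List β),
      l.foldl (fun acc x => acc ++ [f x]) init = init ++ l.map f := by
  intro l
  induction l with
  | nil => intro init; simp
  | cons a t ih => intro init; simp [ih]

-- folding "conditionally append one element" is filter-then-map
theorem foldl_ite_append {α : Type} (p : α → Prop) [DecidablePred p] (f : α → Int) :
    ∀ (l : List α) (init : List Int),
      l.foldl (fun nl j => if p j then nl ++ [f j] else nl) init
        = init ++ (l.filter (fun j => decide (p j))).map f := by
  intro l
  induction l with
  | nil => intro init; simp
  | cons a t ih =>
    intro init
    by_cases h : p a <;> simp [h, ih]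

-- two strictly increasing integer lists with the same members are equal
theorem eq_of_pairwise_lt_of_mem_iff :
    ∀ (l1 l2 : List Int), l1.Pairwise (· < ·) → l2.Pairwise (· < ·) →
      (∀ x, x ∈ l1 ↔ x ∈ l2) → l1 = l2 := by
  intro l1
  induction l1 with
  | nil =>
    intro l2 _ _ hmem
    cases l2 with
    | nil => rfl
    | cons b t2 => exact absurd ((hmem b).2 (by simp)) (by simp)
  | cons a t1 ih =>
    intro l2 h1 h2 hmem
    cases l2 with
    | nil => exact absurd ((hmem a).1 (by simp)) (by simp)
    | cons b t2 =>
      have hab : a = b := by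
        have ha : a = b ∨ a ∈ t2 := by simpa using (hmem a).1 (by simp)
        have hb : b = a ∨ b ∈ t1 := by simpa using (hmem b).2 (by simp)
        rcases ha with h | ha
        · exact h
        · rcases hb with h | hb
          · exact h.symm
          · have h1' : a < b := (List.pairwise_cons.1 h1).1 b hb
            have h2' : b < a := (List.pairwise_cons.1 h2).1 a ha
            omega
      subst hab
      have htail : ∀ x, x ∈ t1 ↔ x ∈ t2 := by
        intro x
        constructor
        · intro hx
          have := (hmem x).1 (by simp [hx])
          rcases List.mem_cons.1 this with h | h
          · subst h; exact absurd ((List.pairwise_cons.1 h1).1 x hx) (lt_irrefl x)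
          · exact h
        · intro hx
          have := (hmem x).2 (by simp [hx])
          rcases List.mem_cons.1 this with h | h
          · subst h; exact absurd ((List.pairwise_cons.1 h2).1 x hx) (lt_irrefl x)
          · exact h
      exact congrArg (a :: ·) (ih t2 (List.pairwise_cons.1 h1).2 (List.pairwise_cons.1 h2).2 htail)

-- zipWith of a mapped left list collapses to a single map
theorem zipWith_map_left_self {α β : Type} (f : β → α → β) (φ : α → β) :
    ∀ (l : List α), List.zipWith f (l.map φ) l = l.map (fun x => f (φ x) x) := by
  intro l
  induction l with
  | nil => rfl
  | cons a t ih => simp [ih]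

-- B's column loop, characterised per row
theorem bfold_characterisation (rows : List (List Int)) (M : Int) :
    ∀ (cs : List Int) (φ : List Int → List Int),
      cs.foldl
        (fun out j =>
          if 1 ≤ j ∧ j < M then
            List.zipWith (fun nl row =>
              if j < (row.length : Int) then nl ++ [PySem.List.pyGetD row j 0] else nl) out rows
          else out) (rows.map φ)
        = rows.map (fun r =>
            φ r ++ (cs.filter (fun j =>
                decide (1 ≤ j) && decide (j < M) && decide (j < (r.length : Int)))).map
              (fun j => PySem.List.pyGetD r j 0)) := by
  intro cs
  induction cs with
  | nil => intro φ; simp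
  | cons c t ih =>
    intro φ
    by_cases hc : 1 ≤ c ∧ c < M
    · simp only [List.foldl_cons, if_pos hc, zipWith_map_left_self]
      rw [ih]
      apply List.map_congr_left
      intro r _
      by_cases hlen : c < (r.length : Int) <;> simp [hc.1, hc.2, hlen]
    · simp only [List.foldl_cons, if_neg hc]
      rw [ih]
      apply List.map_congr_left
      intro r _
      rcases Decidable.not_and_iff_or_not.1 hc with h | h <;> simp [h]

-- A, characterised per row
theorem a_characterisation (dataMatrix : List (List Int)) (recordSet : List Int) :
    getRecordMatrix dataMatrix recordSet
      = (dataMatrix.drop 1).map (fun r =>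
          PySem.List.pyGetD r 0 0 ::
            ((PySem.List.pyRange 1 (r.length : Int) 1).filter (fun j => decide (j ∈ recordSet))).map
              (fun j => PySem.List.pyGetD r j 0)) := by
  have h1 := PySem.List.foldl_pyRange_pyGetD' dataMatrix ([] : List Int)
      (fun outMatrix row =>
        outMatrix ++ [(PySem.List.pyRange 1 (row.length : Int) 1).foldl
          (fun nl j => if j ∈ recordSet then nl ++ [PySem.List.pyGetD row j 0] else nl)
          [PySem.List.pyGetD row 0 0]]) ([] : List (List Int)) (a := 1) (by norm_num)
  refine h1.trans ?_
  rw [foldl_append_singleton]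
  simp only [List.nil_append]
  apply List.map_congr_left
  intro r _
  rw [foldl_ite_append (fun j => j ∈ recordSet)]
  simp

-- B, characterised per row
theorem b_characterisation (dataMatrix : List (List Int)) (recordSet : List Int) :
    getRecordMatrix_alt dataMatrix recordSet
      = (dataMatrix.drop 1).map (fun r =>
          PySem.List.pyGetD r 0 0 ::
            ((PySem.List.sorted (PySem.Set.ofList recordSet) (fun x => x) false).filter
              (fun j => decide (1 ≤ j) && decide (j < ((dataMatrix.tail.map (fun row => (row.length : Int))).foldl max 0))
                && decide (j < (r.length : Int)))).map
              (fun j => PySem.List.pyGetD r j 0)) := by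
  unfold getRecordMatrix_alt
  rw [PySem.List.slice_from_one]
  show (PySem.List.sorted (PySem.Set.ofList recordSet) (fun x => x) false).foldl _
      (dataMatrix.tail.map (fun row => [PySem.List.pyGetD row 0 0])) = _
  rw [bfold_characterisation]
  simp [← List.drop_one]

-- every element is at most the running foldl-max
theorem le_foldl_max :
    ∀ (l : List Int) (init : Int), (∀ x ∈ l, x ≤ l.foldl max init) ∧ init ≤ l.foldl max init := by
  intro l
  induction l with
  | nil => intro init; simp
  | cons a t ih =>
    intro init
    refine ⟨?_, ?_⟩
    · intro x hx
      rcases List.mem_cons.1 hx with h | h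
      · subst h
        exact le_trans (le_max_right init x) (ih (max init x)).2
      · exact (ih (max init a)).1 x h
    · exact le_trans (le_max_left init a) (ih (max init a)).2

-- the two index lists coincide
theorem index_lists_eq (recordSet : List Int) (r : List Int) (M : Int)
    (hM : (r.length : Int) ≤ M) :
    (PySem.List.pyRange 1 (r.length : Int) 1).filter (fun j => decide (j ∈ recordSet))
      = (PySem.List.sorted (PySem.Set.ofList recordSet) (fun x => x) false).filter
          (fun j => decide (1 ≤ j) && decide (j < M) && decide (j < (r.length : Int))) := by
  apply eq_of_pairwise_lt_of_mem_iff
  · exact List.Pairwise.filter _ (PySem.List.pairwise_lt_pyRange_one 1 (r.length : Int))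
  · exact List.Pairwise.filter _ (PySem.List.sorted_ofList_pairwise_lt recordSet)
  · intro x
    simp only [List.mem_filter, PySem.List.mem_pyRange_one, PySem.List.mem_sorted,
      PySem.Set.mem_ofList, decide_eq_true_eq, Bool.and_eq_true]
    constructor
    · rintro ⟨⟨h1, h2⟩, h3⟩; exact ⟨h3, ⟨h1, by omega⟩, h2⟩
    · rintro ⟨h3, ⟨h1, _⟩, h2⟩; exact ⟨⟨h1, h2⟩, h3⟩

-- ===== VERDICT (by name: the statement is the Claim_ definition above) =====
theorem getRecordMatrix_spec : Claim_equal_getRecordMatrix := by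
  intro dataMatrix recordSet _ _
  unfold Spec_getRecordMatrix
  rw [a_characterisation, b_characterisation]
  apply List.map_congr_left
  intro r hr
  rw [index_lists_eq recordSet r _ ((le_foldl_max (dataMatrix.tail.map (fun row => (row.length : Int))) 0).1
    (r.length : Int) (List.mem_map_of_mem (by simpa [← List.drop_one] using hr)))]
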